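-- pv_equiv track=rewrite | github.com/Rounge-lab/GENOMICON-Seq | scripts/ampliseq/convert_csv_to_fasta.py | replace_ambiguous_bases
-- ===== SOURCE A (Python) =====
-- from itertools import product
--
-- ambiguous_bases = {
--     'R': ['A', 'G'],
--     'Y': ['C', 'T'],
--     'S': ['G', 'C'],
--     'W': ['A', 'T'],
--     'K': ['G', 'T'],
--     'M': ['A', 'C'],
--     'B': ['C', 'G', 'T'],
--     'D': ['A', 'G', 'T'],
--     'H': ['A', 'C', 'T'],
--     'V': ['A', 'C', 'G'],
--     'N': ['A', 'C', 'G', 'T']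
-- }
--
-- def replace_ambiguous_bases(seq):
--     ambiguous_bases_in_seq = [(i, base) for i, base in enumerate(seq) if base in ambiguous_bases]
--
--     combinations = product(*(ambiguous_bases[base] for _, base in ambiguous_bases_in_seq))
--
--     for combination in combinations:
--         new_seq = list(seq)
--         for (i, _), replacement in zip(ambiguous_bases_in_seq, combination):
--             new_seq[i] = replacement
--         yield ''.join(new_seq)
-- ===== SOURCE B (Python) =====
-- ambiguous_bases = {
--     'R': ['A', 'G'],
--     'Y': ['C', 'T'],
--     'S': ['G', 'C'],
--     'W': ['A', 'T'],
--     'K': ['G', 'T'],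
--     'M': ['A', 'C'],
--     'B': ['C', 'G', 'T'],
--     'D': ['A', 'G', 'T'],
--     'H': ['A', 'C', 'T'],
--     'V': ['A', 'C', 'G'],
--     'N': ['A', 'C', 'G', 'T']
-- }
--
-- def replace_ambiguous_bases(seq):
--     # Single left-to-right fold over the characters, growing a list of prefixes.
--     # The leftmost ambiguous position splits first, so it varies slowest in the
--     # final list, matching itertools.product's ordering.
--     prefixes = ['']
--     for c in seq:
--         options = ambiguous_bases.get(c)
--         if options is None:
--             prefixes = [p + c for p in prefixes]
--         else:
--             prefixes = [p + o for p in prefixes for o in options]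
--     yield from prefixes
-- ===== Notes on version B (the rewrite author's own statement) =====
-- stated objective: simpler
-- what changed: Replaces the position-list + itertools.product + per-combination in-place list-edit pipeline with a single left-to-right fold over the characters that grows a list of prefixes; no position bookkeeping or list edits remain.
import Mathlib
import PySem

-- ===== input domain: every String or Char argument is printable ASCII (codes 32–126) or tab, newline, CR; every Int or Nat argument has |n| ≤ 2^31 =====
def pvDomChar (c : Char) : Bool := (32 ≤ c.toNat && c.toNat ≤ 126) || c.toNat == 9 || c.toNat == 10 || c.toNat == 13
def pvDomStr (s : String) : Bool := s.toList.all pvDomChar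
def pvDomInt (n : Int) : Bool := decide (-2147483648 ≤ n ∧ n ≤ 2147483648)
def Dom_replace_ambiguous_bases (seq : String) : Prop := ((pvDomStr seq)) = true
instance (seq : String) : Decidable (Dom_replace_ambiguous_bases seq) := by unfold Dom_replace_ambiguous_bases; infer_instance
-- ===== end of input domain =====

-- B replaces A's position-list + itertools.product + per-combination list-edit pipeline by a single
-- left-to-right fold over the characters that grows a list of prefixes (objective: simpler). Both
-- generators are ported as the list of their yields.

-- ===== PORT A =====
-- the module-level dict 'ambiguous_bases'
def pvAmbDict : PySem.Dict Char (List Char) := PySem.Dict.ofList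
  [('R', ['A', 'G']), ('Y', ['C', 'T']), ('S', ['G', 'C']), ('W', ['A', 'T']),
   ('K', ['G', 'T']), ('M', ['A', 'C']), ('B', ['C', 'G', 'T']), ('D', ['A', 'G', 'T']),
   ('H', ['A', 'C', 'T']), ('V', ['A', 'C', 'G']), ('N', ['A', 'C', 'G', 'T'])]

-- itertools.product over a list of pools (documented semantics: nested loops, leftmost slowest)
def pvProduct : List (List Char) → List (List Char)
  | [] => [[]]
  | l :: ls => l.flatMap (fun x => (pvProduct ls).map (x :: ·))

def replace_ambiguous_bases (seq : String) : List String :=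
  let cs := seq.toList
  let amb := (PySem.List.enumerate cs 0).filter (fun p => PySem.Dict.contains pvAmbDict p.2)
  -- ambiguous_bases[base]: the key is present by construction (just filtered), so getD's default is dead
  let combos := pvProduct (amb.map (fun p => (PySem.Dict.get? pvAmbDict p.2).getD []))
  combos.map (fun comb =>
    String.ofList ((amb.zip comb).foldl (fun l pr => PySem.List.pySetD l pr.1.1 pr.2) cs))

-- ===== PORT B =====
-- Source B's loop body: extend every prefix by this character's replacements
-- (the Python str prefixes are carried as List Char, joined at the yields)
def pvStep (prefixes : List (List Char)) (c : Char) : List (List Char) :=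
  match PySem.Dict.get? pvAmbDict c with
  | none => prefixes.map (fun p => p ++ [c])
  | some opts => prefixes.flatMap (fun p => opts.map (fun o => p ++ [o]))

def replace_ambiguous_bases_alt (seq : String) : List String :=
  (seq.toList.foldl pvStep [[]]).map String.ofList

-- ===== PRECONDITION & SPEC =====
def Spec_replace_ambiguous_bases (seq : String) (out : List String) : Prop := out = replace_ambiguous_bases_alt seq
instance (seq : String) (out : List String) : Decidable (Spec_replace_ambiguous_bases seq out) := by unfold Spec_replace_ambiguous_bases; infer_instance

-- ===== CLAIM (what is proved, stated in full; the proofs are below) =====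
def Claim_equal_replace_ambiguous_bases : Prop := ∀ (seq : String), Dom_replace_ambiguous_bases seq → Spec_replace_ambiguous_bases seq (replace_ambiguous_bases seq)

-- ===== LEMMAS AND PROOFS =====

-- the common expansion shape both ports are reduced to
def pvE : List Char → List (List Char)
  | [] => [[]]
  | c :: rest =>
    (match PySem.Dict.get? pvAmbDict c with
     | none => [c]
     | some opts => opts).flatMap (fun x => (pvE rest).map (x :: ·))

-- B's fold from any prefix list appends every expansion to every prefix
theorem pvFoldl_eq (cs : List Char) : ∀ (prefixes : List (List Char)),
    cs.foldl pvStep prefixes = prefixes.flatMap (fun p => (pvE cs).map (p ++ ·)) := by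
  induction cs with
  | nil => intro prefixes; simp [pvE]
  | cons c rest ih =>
    intro prefixes
    rw [List.foldl_cons, ih]
    simp only [pvStep, pvE]
    cases h : PySem.Dict.get? pvAmbDict c with
    | none =>
      simp [List.flatMap_map, List.map_map, Function.comp_def, List.append_assoc]
    | some opts =>
      simp [List.flatMap_map, List.map_flatMap, List.flatMap_assoc, List.map_map,
        Function.comp_def, List.append_assoc]

-- enumerate shift: enumerate xs (s+1) = shift of enumerate xs s
theorem pvEnumerate_shift (xs : List Char) : ∀ s : Int,
    PySem.List.enumerate xs (s + 1) = (PySem.List.enumerate xs s).map (fun p => (p.1 + 1, p.2)) := by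
  induction xs with
  | nil => intro s; simp [PySem.List.enumerate_nil]
  | cons x xs ih =>
    intro s
    rw [PySem.List.enumerate_cons, PySem.List.enumerate_cons, ih (s + 1)]
    simp

-- every index produced by 'enumerate xs 0' is nonnegative
theorem pvEnumerate_nonneg {xs : List Char} {p : Int × Char}
    (h : p ∈ PySem.List.enumerate xs 0) : 0 ≤ p.1 := by
  rcases (PySem.List.mem_enumerate_iff xs 0 p).1 h with ⟨k, hk, rfl⟩
  simp

-- setting the shifted positions in (c :: base) leaves the head alone
theorem pvFold_shift (pairs : List (Int × Char)) : ∀ (comb : List Char) (base : List Char) (c : Char),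
    (∀ p ∈ pairs, 0 ≤ p.1) →
    ((pairs.map (fun p => (p.1 + 1, p.2))).zip comb).foldl
        (fun l pr => PySem.List.pySetD l pr.1.1 pr.2) (c :: base)
      = c :: (pairs.zip comb).foldl (fun l pr => PySem.List.pySetD l pr.1.1 pr.2) base := by
  induction pairs with
  | nil => intro comb base c _; simp
  | cons q qs ih =>
    intro comb base c hnn
    cases comb with
    | nil => simp
    | cons r comb =>
      have hq : 0 ≤ q.1 := hnn q (List.mem_cons_self ..)
      simp only [List.map_cons, List.zip_cons_cons, List.foldl_cons]
      rw [PySem.List.pySetD_of_nonneg (c :: base) r (show (0:Int) ≤ q.1 + 1 by omega),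
        PySem.List.pySetD_of_nonneg base r hq]
      have ht : (q.1 + 1).toNat = q.1.toNat + 1 := by omega
      rw [ht, List.set_cons_succ]
      exact ih comb _ c (fun p hp => hnn p (List.mem_cons_of_mem _ hp))

-- A's pipeline over the character list equals the expansion pvE
theorem pvA_core (cs : List Char) :
    (pvProduct (((PySem.List.enumerate cs 0).filter
        (fun p => PySem.Dict.contains pvAmbDict p.2)).map
        (fun p => (PySem.Dict.get? pvAmbDict p.2).getD []))).map
      (fun comb =>
        ((((PySem.List.enumerate cs 0).filter
            (fun p => PySem.Dict.contains pvAmbDict p.2)).zip comb).foldl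
          (fun l pr => PySem.List.pySetD l pr.1.1 pr.2) cs))
    = pvE cs := by
  induction cs with
  | nil => simp [PySem.List.enumerate_nil, pvProduct, pvE]
  | cons c rest ih =>
    have hshift := pvEnumerate_shift rest 0
    rw [PySem.List.enumerate_cons, hshift]
    have hnn : ∀ p ∈ (PySem.List.enumerate rest 0).filter
        (fun p => PySem.Dict.contains pvAmbDict p.2), 0 ≤ p.1 := by
      intro p hp
      exact pvEnumerate_nonneg (List.mem_of_mem_filter hp)
    cases h : PySem.Dict.get? pvAmbDict c with
    | none =>
      have hc : PySem.Dict.contains pvAmbDict c = false := by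
        rw [PySem.Dict.contains_eq_isSome_get?, h]; rfl
      simp only [List.filter_cons, hc, List.filter_map]
      have hfilter : ((fun p : Int × Char => PySem.Dict.contains pvAmbDict p.2) ∘
          (fun q : Int × Char => (q.1 + 1, q.2)))
          = (fun p : Int × Char => PySem.Dict.contains pvAmbDict p.2) := rfl
      rw [if_neg (by simp), hfilter]
      simp only [List.map_map]
      have hopts : ((fun p : Int × Char => (PySem.Dict.get? pvAmbDict p.2).getD []) ∘
          (fun q : Int × Char => (q.1 + 1, q.2)))
          = (fun p : Int × Char => (PySem.Dict.get? pvAmbDict p.2).getD []) := rfl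
      rw [hopts]
      rw [List.map_congr_left (fun comb _ => pvFold_shift _ comb rest c hnn)]
      simp only [pvE, h, List.flatMap_cons, List.flatMap_nil, List.append_nil]
      rw [← ih, List.map_map]
      rfl
    | some opts =>
      have hc : PySem.Dict.contains pvAmbDict c = true := by
        rw [PySem.Dict.contains_eq_isSome_get?, h]; rfl
      simp only [List.filter_cons, hc, List.filter_map]
      rw [if_pos trivial]
      have hfilter : ((fun p : Int × Char => PySem.Dict.contains pvAmbDict p.2) ∘
          (fun q : Int × Char => (q.1 + 1, q.2)))
          = (fun p : Int × Char => PySem.Dict.contains pvAmbDict p.2) := rfl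
      rw [hfilter]
      simp only [List.map_cons, List.map_map, h, Option.getD_some]
      have hopts : ((fun p : Int × Char => (PySem.Dict.get? pvAmbDict p.2).getD []) ∘
          (fun q : Int × Char => (q.1 + 1, q.2)))
          = (fun p : Int × Char => (PySem.Dict.get? pvAmbDict p.2).getD []) := rfl
      rw [hopts]
      simp only [pvProduct, List.map_flatMap, List.map_map]
      simp only [pvE, h]
      refine List.flatMap_congr fun o _ => ?_
      rw [← ih]
      simp only [List.map_map]
      refine List.map_congr_left fun comb _ => ?_
      simp only [Function.comp_apply, List.zip_cons_cons, List.foldl_cons]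
      rw [PySem.List.pySetD_of_nonneg (c :: rest) o (le_refl (0:Int))]
      simp only [Int.toNat_zero, List.set_cons_zero]
      exact pvFold_shift _ comb rest o hnn

-- ===== VERDICT (by name: the statement is the Claim_ definition above) =====
theorem replace_ambiguous_bases_spec : Claim_equal_replace_ambiguous_bases := by
  intro seq _
  unfold Spec_replace_ambiguous_bases replace_ambiguous_bases replace_ambiguous_bases_alt
  rw [pvFoldl_eq]
  simp only [List.flatMap_cons, List.flatMap_nil, List.append_nil, List.nil_append]
  rw [← pvA_core seq.toList]
  simp [List.map_map, Function.comp_def]
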